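-- pv_equiv track=rewrite | github.com/pypi-data/pypi-mirror-400 | packages/ork.build/ork_build-0.0.295.dev3.tar.gz/ork_build-0.0.295.dev3/scripts/obt/cpp_formatter.py | _apply_common_simplifications
-- ===== SOURCE A (Python) =====
-- def _apply_common_simplifications(type_str: str) -> str:
--     """Apply common type simplifications"""
--
--     # Common typedef replacements (can be extended based on project conventions)
--     common_typedefs = {
--         # Orkid common typedefs
--         "std::shared_ptr<Context>": "context_ptr_t",
--         "std::shared_ptr<const Context>": "const_context_ptr_t",
--         "std::shared_ptr<Buffer>": "buffer_ptr_t",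
--         "std::unique_ptr<Buffer>": "buffer_uptr_t",
--         "std::shared_ptr<RenderContextFrameData>": "rcfd_ptr_t",
--         "std::shared_ptr<FxShaderMaterial>": "fxmaterial_ptr_t",
--         "std::shared_ptr<FxShaderParam>": "fxparam_ptr_t",
--         "std::shared_ptr<GfxMaterial>": "material_ptr_t",
--         "std::shared_ptr<Texture>": "texture_ptr_t",
--         "std::shared_ptr<RenderTarget>": "rtbuffer_ptr_t",
--         "std::shared_ptr<VertexBuffer>": "vtxbuf_ptr_t",
--         "std::shared_ptr<IndexBuffer>": "idxbuf_ptr_t",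
--         "std::shared_ptr<DrawableBuffer>": "drawbuffer_ptr_t",
--         # Common STL typedefs
--         "std::vector<std::string>": "string_vector_t",
--         "std::unordered_map<std::string, std::string>": "string_map_t",
--         "std::unordered_map<std::string, int>": "string_int_map_t",
--     }
--
--     # Apply known typedefs
--     for full_type, typedef in common_typedefs.items():
--         if full_type in type_str:
--             type_str = type_str.replace(full_type, typedef)
--
--     # Simplify std:: types when unambiguous
--     std_simplifications = {
--         "std::string": "string",
--         "std::vector": "vector",
--         "std::shared_ptr": "shared_ptr",
--         "std::unique_ptr": "unique_ptr",
--         "std::map": "map",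
--         "std::unordered_map": "unordered_map",
--     }
--
--     # Only apply std:: simplifications if not ambiguous
--     # (this is a conservative approach, can be made more aggressive)
--
--     return type_str
-- ===== SOURCE B (Python) =====
-- # Single left-to-right pass: jump between "std::" occurrences with str.find and
-- # apply the matching typedef suffix there, instead of one replace() scan per entry.
-- # Every key starts with "std::", so the table stores "suffix=alias" entries.
-- _ENTRIES = [
--     "shared_ptr<Context>=context_ptr_t",
--     "shared_ptr<const Context>=const_context_ptr_t",
--     "shared_ptr<Buffer>=buffer_ptr_t",
--     "unique_ptr<Buffer>=buffer_uptr_t",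
--     "shared_ptr<RenderContextFrameData>=rcfd_ptr_t",
--     "shared_ptr<FxShaderMaterial>=fxmaterial_ptr_t",
--     "shared_ptr<FxShaderParam>=fxparam_ptr_t",
--     "shared_ptr<GfxMaterial>=material_ptr_t",
--     "shared_ptr<Texture>=texture_ptr_t",
--     "shared_ptr<RenderTarget>=rtbuffer_ptr_t",
--     "shared_ptr<VertexBuffer>=vtxbuf_ptr_t",
--     "shared_ptr<IndexBuffer>=idxbuf_ptr_t",
--     "shared_ptr<DrawableBuffer>=drawbuffer_ptr_t",
--     "vector<std::string>=string_vector_t",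
--     "unordered_map<std::string, std::string>=string_map_t",
--     "unordered_map<std::string, int>=string_int_map_t",
-- ]
-- _SUFFIXES = [entry.split("=") for entry in _ENTRIES]
--
--
-- def _apply_common_simplifications(type_str: str) -> str:
--     """Apply common type simplifications (single pass over the string)."""
--     out = []
--     i = 0
--     while True:
--         j = type_str.find("std::", i)
--         if j == -1:
--             out.append(type_str[i:])
--             break
--         out.append(type_str[i:j])
--         for suffix, alias in _SUFFIXES:
--             if type_str.startswith(suffix, j + 5):
--                 out.append(alias)
--                 i = j + 5 + len(suffix)
--                 break
--         else:
--             out.append(type_str[j])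
--             i = j + 1
--     return "".join(out)
-- ===== Notes on version B (the rewrite author's own statement) =====
-- stated objective: faster
-- what changed: A runs one full-string `in` test plus `str.replace` scan per table entry (16 sequential passes); B makes a single left-to-right pass that jumps between "std::" occurrences with str.find (every typedef key starts with "std::") and applies the matching typedef suffix there, with the table kept as "suffix=alias" entries split once at import; A's dead std_simplifications dict is dropped.
import Mathlib
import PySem

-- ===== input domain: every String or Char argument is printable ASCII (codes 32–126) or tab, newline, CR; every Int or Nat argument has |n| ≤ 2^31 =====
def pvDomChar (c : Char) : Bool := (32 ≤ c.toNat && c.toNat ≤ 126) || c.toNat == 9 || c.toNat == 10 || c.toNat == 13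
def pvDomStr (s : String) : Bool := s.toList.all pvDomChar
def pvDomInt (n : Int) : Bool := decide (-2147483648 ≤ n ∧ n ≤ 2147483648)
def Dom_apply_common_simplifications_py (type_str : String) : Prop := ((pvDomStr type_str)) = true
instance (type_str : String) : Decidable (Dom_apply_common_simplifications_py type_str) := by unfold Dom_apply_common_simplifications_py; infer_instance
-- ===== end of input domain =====

-- B replaces A's 16 sequential full-string `replace` passes by ONE left-to-right pass that
-- jumps between "std::" occurrences with str.find (every typedef key starts with "std::")
-- and applies the matching typedef suffix there; A's `std_simplifications` dict is dead code
-- (defined, never applied), so neither side carries it.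

-- ===== PORT A =====
-- A's typedef table, and A: for each entry in order,
-- `if full_type in type_str: type_str = type_str.replace(full_type, typedef)`.
def pvTypedefs : List (String × String) :=
  [("std::shared_ptr<Context>", "context_ptr_t"),
   ("std::shared_ptr<const Context>", "const_context_ptr_t"),
   ("std::shared_ptr<Buffer>", "buffer_ptr_t"),
   ("std::unique_ptr<Buffer>", "buffer_uptr_t"),
   ("std::shared_ptr<RenderContextFrameData>", "rcfd_ptr_t"),
   ("std::shared_ptr<FxShaderMaterial>", "fxmaterial_ptr_t"),
   ("std::shared_ptr<FxShaderParam>", "fxparam_ptr_t"),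
   ("std::shared_ptr<GfxMaterial>", "material_ptr_t"),
   ("std::shared_ptr<Texture>", "texture_ptr_t"),
   ("std::shared_ptr<RenderTarget>", "rtbuffer_ptr_t"),
   ("std::shared_ptr<VertexBuffer>", "vtxbuf_ptr_t"),
   ("std::shared_ptr<IndexBuffer>", "idxbuf_ptr_t"),
   ("std::shared_ptr<DrawableBuffer>", "drawbuffer_ptr_t"),
   ("std::vector<std::string>", "string_vector_t"),
   ("std::unordered_map<std::string, std::string>", "string_map_t"),
   ("std::unordered_map<std::string, int>", "string_int_map_t")]

def apply_common_simplifications_py (type_str : String) : String :=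
  pvTypedefs.foldl
    (fun s kv => if PySem.Str.isIn kv.1 s then PySem.Str.replace s kv.1 kv.2 else s)
    type_str

-- ===== PORT B =====
-- B's table: "suffix=alias" entries (keys with the common "std::" prefix stripped),
-- split into pairs once, exactly as Source B does.
def pvEntries : List String :=
  ["shared_ptr<Context>=context_ptr_t",
   "shared_ptr<const Context>=const_context_ptr_t",
   "shared_ptr<Buffer>=buffer_ptr_t",
   "unique_ptr<Buffer>=buffer_uptr_t",
   "shared_ptr<RenderContextFrameData>=rcfd_ptr_t",
   "shared_ptr<FxShaderMaterial>=fxmaterial_ptr_t",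
   "shared_ptr<FxShaderParam>=fxparam_ptr_t",
   "shared_ptr<GfxMaterial>=material_ptr_t",
   "shared_ptr<Texture>=texture_ptr_t",
   "shared_ptr<RenderTarget>=rtbuffer_ptr_t",
   "shared_ptr<VertexBuffer>=vtxbuf_ptr_t",
   "shared_ptr<IndexBuffer>=idxbuf_ptr_t",
   "shared_ptr<DrawableBuffer>=drawbuffer_ptr_t",
   "vector<std::string>=string_vector_t",
   "unordered_map<std::string, std::string>=string_map_t",
   "unordered_map<std::string, int>=string_int_map_t"]

-- `entry.split("=")` always yields exactly [suffix, alias] here (no '=' inside either part)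
def pvSuffixes : List (String × String) :=
  pvEntries.map (fun e =>
    match PySem.Str.split? e "=" with | some [k, v] => (k, v) | _ => ("", ""))

def pvStdB : List Char := "std::".toList

-- B's while-loop: state = remaining suffix of the input; each round finds the next "std::"
-- (`type_str.find("std::", i)` ≡ find on the remaining suffix), copies the text before it,
-- and at it applies the first table entry whose suffix matches after the "std::"
-- (`type_str.startswith(suffix, j + 5)`), or copies one character.
def pvScanB : List Char → List Char
  | [] => []
  | c :: t =>
    let j := PySem.Chars.find (c :: t) pvStdB
    if j = -1 then c :: t
    else
      match List.find? (fun kr => kr.1.toList.isPrefixOf ((c :: t).drop (j.toNat + 5))) pvSuffixes with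
      | some kr =>
        (c :: t).take j.toNat ++ kr.2.toList ++
          pvScanB ((c :: t).drop (j.toNat + 5 + kr.1.toList.length))
      | none => (c :: t).take (j.toNat + 1) ++ pvScanB ((c :: t).drop (j.toNat + 1))
  termination_by l => l.length
  decreasing_by
  · simp only [List.length_drop, List.length_cons]; omega
  · simp only [List.length_drop, List.length_cons]; omega

def apply_common_simplifications_py_alt (type_str : String) : String :=
  String.ofList (pvScanB type_str.toList)

-- ===== PRECONDITION & SPEC =====
def Spec_apply_common_simplifications_py (type_str : String) (out : String) : Prop := out = apply_common_simplifications_py_alt type_str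
instance (type_str : String) (out : String) : Decidable (Spec_apply_common_simplifications_py type_str out) := by unfold Spec_apply_common_simplifications_py; infer_instance

-- ===== CLAIM (what is proved, stated in full; the proofs are below) =====
def Claim_equal_apply_common_simplifications_py : Prop := ∀ (type_str : String), Dom_apply_common_simplifications_py type_str → Spec_apply_common_simplifications_py type_str (apply_common_simplifications_py type_str)

-- ===== LEMMAS AND PROOFS =====

-- the char-level pairs of A's table (proof-side view; B's table is related to it by pvTableEq below)
def pvPairs : List (List Char × List Char) := pvTypedefs.map (fun p => (p.1.toList, p.2.toList))

-- B's table carries exactly A's keys with the "std::" prefix split off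
set_option maxRecDepth 100000 in
set_option maxHeartbeats 4000000 in
theorem pvTableEq : pvPairs = pvSuffixes.map (fun p => (pvStdB ++ p.1.toList, p.2.toList)) := by
  decide

-- ---- literal facts about the table (all discharged by decide) ----

-- every key and every replacement is nonempty
theorem pvF_ne : ∀ kr ∈ pvPairs, kr.1 ≠ [] := by decide

-- every key starts with "std::"
theorem pvF_std : ∀ kr ∈ pvPairs, pvStdB <+: kr.1 := by decide

-- the keys are pairwise distinct
theorem pvF_nodup : (pvPairs.map Prod.fst).Nodup := by decide

-- no (possibly full) tail of a key is a prefix of a replacement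
theorem pvF1 : ∀ kr ∈ pvPairs, ∀ j, j < kr.1.length → ∀ kr' ∈ pvPairs, ¬ (kr.1.drop j <+: kr'.2) := by decide

-- no replacement occurs inside a key
theorem pvF2 : ∀ kr ∈ pvPairs, ∀ kr' ∈ pvPairs, ¬ (kr.2 <:+: kr'.1) := by decide

-- no key occurs inside a DIFFERENT key
theorem pvF4 : ∀ kr ∈ pvPairs, ∀ kr' ∈ pvPairs, kr.1 = kr'.1 ∨ ¬ (kr.1 <:+: kr'.1) := by decide

-- no proper tail of a key is a prefix of a key
theorem pvF5 : ∀ kr ∈ pvPairs, ∀ p, 1 ≤ p → p < kr.1.length → ∀ kr' ∈ pvPairs, ¬ (kr.1.drop p <+: kr'.1) := by decide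

-- no key occurs inside a replacement
theorem pvF6 : ∀ kr ∈ pvPairs, ∀ kr' ∈ pvPairs, ¬ (kr.1 <:+: kr'.2) := by decide

-- no proper tail of a replacement is a prefix of a key
theorem pvF9 : ∀ kr ∈ pvPairs, ∀ p, 1 ≤ p → p < kr.2.length → ∀ kr' ∈ pvPairs, ¬ (kr.2.drop p <+: kr'.1) := by decide

-- ---- a fuel-free form of Python's str.replace (for nonempty pattern) ----

def pvRep (k r : List Char) : List Char → List Char
  | [] => []
  | c :: t =>
    if k.isPrefixOf (c :: t) then r ++ pvRep k r (List.drop (k.length - 1) t)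
    else c :: pvRep k r t
  termination_by l => l.length
  decreasing_by
  · simp only [List.length_drop, List.length_cons]; omega
  · simp only [List.length_cons]; omega

theorem pvRep_nil (k r : List Char) : pvRep k r [] = [] := by
  rw [pvRep]

theorem pvRep_cons (k r : List Char) (c : Char) (t : List Char) :
    pvRep k r (c :: t) =
      if k.isPrefixOf (c :: t) then r ++ pvRep k r (List.drop (k.length - 1) t)
      else c :: pvRep k r t := by
  rw [pvRep]

theorem pvRep_go (k r : List Char) (hk : k ≠ []) :
    ∀ fuel (l acc : List Char), l.length ≤ fuel →
      PySem.Chars.replace.go k r fuel l acc = acc.reverse ++ pvRep k r l := by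
  have hk1 : 1 ≤ k.length := List.length_pos_iff.mpr hk
  intro fuel
  induction fuel with
  | zero =>
    intro l acc h
    have hl : l = [] := by cases l <;> simp_all
    subst hl
    rw [PySem.Chars.replace.go.eq_def, pvRep_nil]
  | succ n ih =>
    intro l acc h
    cases l with
    | nil =>
      rw [PySem.Chars.replace.go.eq_def, pvRep_nil]
      simp
    | cons c t =>
      rw [PySem.Chars.replace.go.eq_def]
      simp only []
      rw [pvRep_cons]
      by_cases hp : k.isPrefixOf (c :: t)
      · simp only [hp, if_true]
        have hdl : (List.drop k.length (c :: t)).length ≤ n := by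
          simp only [List.length_drop, List.length_cons]
          simp only [List.length_cons] at h
          omega
        rw [ih _ _ hdl]
        have hdrop : List.drop k.length (c :: t) = List.drop (k.length - 1) t := by
          cases k with
          | nil => exact absurd rfl hk
          | cons k0 k1 => simp [List.length_cons]
        rw [hdrop, List.reverse_append, List.reverse_reverse, List.append_assoc]
      · simp only [hp]
        have hdl : t.length ≤ n := by simp only [List.length_cons] at h; omega
        rw [ih _ _ hdl]
        simp

theorem pvReplace_eq_rep (k r l : List Char) (hk : k ≠ []) :
    PySem.Chars.replace l k r = pvRep k r l := by
  unfold PySem.Chars.replace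
  have : k.isEmpty = false := by cases k <;> simp_all
  rw [this]
  simpa using pvRep_go k r hk l.length l [] le_rfl

-- A's fold, at character level
def pvStep (l : List Char) (kr : List Char × List Char) : List Char :=
  if PySem.Chars.isIn kr.1 l then PySem.Chars.replace l kr.1 kr.2 else l

def pvFold (P : List (List Char × List Char)) (l : List Char) : List Char := P.foldl pvStep l

-- the simple one-character-at-a-time scan: the common spec both programs are reduced to
def pvScanS : List Char → List Char
  | [] => []
  | c :: t =>
    match List.find? (fun kr => kr.1.isPrefixOf (c :: t)) pvPairs with
    | some kr => kr.2 ++ pvScanS (List.drop (kr.1.length - 1) t)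
    | none => c :: pvScanS t
  termination_by l => l.length
  decreasing_by
  · simp only [List.length_drop, List.length_cons]; omega
  · simp only [List.length_cons]; omega


-- ---- tail preservation: a (tail of a) key that is a prefix of a replaced string
--      was already a prefix of the original string ----

theorem pvTailPres : ∀ (n : Nat) (t : List Char), t.length ≤ n →
    ∀ kr ∈ pvPairs, ∀ kr' ∈ pvPairs, ∀ j : Nat,
      (kr'.1.drop j) <+: pvRep kr.1 kr.2 t → (kr'.1.drop j) <+: t := by
  intro n
  induction n with
  | zero =>
    intro t ht kr hkr kr' hkr' j h
    have : t = [] := by cases t <;> simp_all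
    subst this
    rw [pvRep_nil] at h
    exact h
  | succ n ih =>
    intro t ht kr hkr kr' hkr' j h
    cases t with
    | nil => rw [pvRep_nil] at h; exact h
    | cons c t' =>
      rw [pvRep_cons] at h
      by_cases hp : kr.1.isPrefixOf (c :: t')
      · rw [if_pos hp] at h
        rcases List.prefix_or_prefix_of_prefix h (List.prefix_append kr.2 _) with h1 | h1
        · by_cases hj : j < kr'.1.length
          · exact absurd h1 (pvF1 kr' hkr' j hj kr hkr)
          · have : kr'.1.drop j = [] := List.drop_eq_nil_of_le (by omega)
            rw [this]; exact List.nil_prefix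
        · exact absurd (h1.isInfix.trans (List.drop_suffix j kr'.1).isInfix)
            (pvF2 kr hkr kr' hkr')
      · rw [if_neg hp] at h
        rcases hw : kr'.1.drop j with _ | ⟨w0, w1⟩
        · exact List.nil_prefix
        · rw [hw] at h
          obtain ⟨hc, h1⟩ := List.cons_prefix_cons.mp h
          have hw1 : kr'.1.drop (j + 1) = w1 := by
            have h2 : List.drop 1 (List.drop j kr'.1) = List.drop (j + 1) kr'.1 :=
              List.drop_drop
            rw [hw] at h2
            simp only [List.drop_one, List.tail_cons] at h2
            rw [← h2]
          have ht' : t'.length ≤ n := by simp only [List.length_cons] at ht; omega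
          have := ih t' ht' kr hkr kr' hkr' (j + 1) (by rw [hw1]; exact h1)
          rw [hw1] at this
          exact List.cons_prefix_cons.mpr ⟨hc, this⟩

-- ---- no key matches at the head: the fold steps commute with cons ----

def pvGood (c : Char) (u : List Char) : Prop := ∀ kr ∈ pvPairs, ¬ kr.1 <+: (c :: u)

theorem pvGood_step (c : Char) (u : List Char) (h : pvGood c u)
    (kr : List Char × List Char) (hkr : kr ∈ pvPairs) : pvGood c (pvStep u kr) := by
  unfold pvStep
  by_cases hin : PySem.Chars.isIn kr.1 u
  · rw [if_pos hin, pvReplace_eq_rep _ _ _ (pvF_ne kr hkr)]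
    intro kr' hkr' hpre
    rcases hk' : kr'.1 with _ | ⟨a, w1⟩
    · exact (pvF_ne kr' hkr') hk'
    · rw [hk'] at hpre
      obtain ⟨hc, h1⟩ := List.cons_prefix_cons.mp hpre
      have hw1 : kr'.1.drop 1 = w1 := by rw [hk']; simp
      have := pvTailPres u.length u le_rfl kr hkr kr' hkr' 1 (by rw [hw1]; exact h1)
      rw [hw1] at this
      exact h kr' hkr' (by rw [hk']; exact List.cons_prefix_cons.mpr ⟨hc, this⟩)
  · rw [if_neg hin]; exact h

theorem pvStep_cons (c : Char) (u : List Char) (kr : List Char × List Char)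
    (hkr : kr ∈ pvPairs) (hnp : ¬ kr.1 <+: (c :: u)) :
    pvStep (c :: u) kr = c :: pvStep u kr := by
  unfold pvStep
  by_cases hu : PySem.Chars.isIn kr.1 u
  · have hcu : PySem.Chars.isIn kr.1 (c :: u) = true := by
      rw [PySem.Chars.isIn_iff_infix]
      exact List.infix_cons_iff.mpr (Or.inr ((PySem.Chars.isIn_iff_infix _ _).mp hu))
    rw [if_pos hcu, if_pos hu,
        pvReplace_eq_rep _ _ _ (pvF_ne kr hkr), pvReplace_eq_rep _ _ _ (pvF_ne kr hkr),
        pvRep_cons, if_neg (by rw [List.isPrefixOf_iff_prefix]; exact hnp)]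
  · have hcu : PySem.Chars.isIn kr.1 (c :: u) = false := by
      rw [PySem.Chars.isIn_eq_false_iff]
      intro hinf
      rcases List.infix_cons_iff.mp hinf with h1 | h1
      · exact hnp h1
      · exact hu ((PySem.Chars.isIn_iff_infix _ _).mpr h1)
    rw [if_neg (by simp [hcu]), if_neg (by simp [hu])]

theorem pvFold_cons (P : List (List Char × List Char)) (hP : ∀ x ∈ P, x ∈ pvPairs) :
    ∀ (c : Char) (u : List Char), pvGood c u →
      List.foldl pvStep (c :: u) P = c :: List.foldl pvStep u P := by
  induction P with
  | nil => intro c u _; rfl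
  | cons kr P' ih =>
    intro c u h
    have hkr : kr ∈ pvPairs := hP kr List.mem_cons_self
    rw [List.foldl_cons, List.foldl_cons,
        pvStep_cons c u kr hkr (h kr hkr)]
    exact ih (fun x hx => hP x (List.mem_cons_of_mem _ hx)) c (pvStep u kr)
      (pvGood_step c u h kr hkr)

-- ---- no key matches inside a fixed block `a`: the fold steps commute with (a ++ ·) ----

def pvNoHit (k a : List Char) : Prop := ∀ p, p < a.length → ∀ v, ¬ k <+: (a.drop p ++ v)

theorem pvRep_shift (k r : List Char) (_hk : k ≠ []) :
    ∀ (a v : List Char), pvNoHit k a → pvRep k r (a ++ v) = a ++ pvRep k r v := by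
  intro a
  induction a with
  | nil => intro v _; simp
  | cons c a' ih =>
    intro v h
    rw [List.cons_append, pvRep_cons,
        if_neg (by rw [List.isPrefixOf_iff_prefix]
                   exact h 0 (by simp) v),
        ih v (by intro p hp v'
                 have := h (p + 1) (by simp only [List.length_cons]; omega) v'
                 simpa using this)]
    rfl

theorem pvStep_shift (kr : List Char × List Char) (hkr : kr ∈ pvPairs)
    (a v : List Char) (h : pvNoHit kr.1 a) :
    pvStep (a ++ v) kr = a ++ pvStep v kr := by
  unfold pvStep
  by_cases hv : PySem.Chars.isIn kr.1 v
  · have hav : PySem.Chars.isIn kr.1 (a ++ v) = true := by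
      rw [← PySem.Chars.exists_prefix_drop_iff_isIn]
      obtain ⟨j, hj⟩ := (PySem.Chars.exists_prefix_drop_iff_isIn kr.1 v).mpr hv
      refine ⟨a.length + j, ?_⟩
      rw [List.drop_append, List.drop_eq_nil_of_le (by omega), List.nil_append,
          Nat.add_sub_cancel_left]
      exact hj
    rw [if_pos hav, if_pos hv,
        pvReplace_eq_rep _ _ _ (pvF_ne kr hkr), pvReplace_eq_rep _ _ _ (pvF_ne kr hkr)]
    exact pvRep_shift kr.1 kr.2 (pvF_ne kr hkr) a v h
  · have hav : PySem.Chars.isIn kr.1 (a ++ v) = false := by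
      by_contra hx
      have hx' : PySem.Chars.isIn kr.1 (a ++ v) = true := by
        cases hy : PySem.Chars.isIn kr.1 (a ++ v) <;> simp_all
      obtain ⟨j, hj⟩ := (PySem.Chars.exists_prefix_drop_iff_isIn kr.1 (a ++ v)).mpr hx'
      by_cases hja : j < a.length
      · have : List.drop j (a ++ v) = a.drop j ++ v := by
          rw [List.drop_append, Nat.sub_eq_zero_of_le (by omega), List.drop_zero]
        exact h j hja v (by rwa [this] at hj)
      · have : List.drop j (a ++ v) = v.drop (j - a.length) := by
          rw [List.drop_append, List.drop_eq_nil_of_le (by omega), List.nil_append]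
        rw [this] at hj
        exact absurd ((PySem.Chars.exists_prefix_drop_iff_isIn kr.1 v).mp ⟨_, hj⟩)
          (by simp [hv])
    rw [if_neg (by simp [hav]), if_neg (by simp [hv])]

theorem pvFold_shift (P : List (List Char × List Char)) (hP : ∀ x ∈ P, x ∈ pvPairs)
    (a : List Char) (h : ∀ x ∈ P, pvNoHit x.1 a) :
    ∀ v, List.foldl pvStep (a ++ v) P = a ++ List.foldl pvStep v P := by
  induction P with
  | nil => intro v; rfl
  | cons kr P' ih =>
    intro v
    rw [List.foldl_cons, List.foldl_cons,
        pvStep_shift kr (hP kr List.mem_cons_self) a v (h kr List.mem_cons_self)]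
    exact ih (fun x hx => hP x (List.mem_cons_of_mem _ hx))
      (fun x hx => h x (List.mem_cons_of_mem _ hx)) (pvStep v kr)

theorem pvPre_noHit (kr kr' : List Char × List Char) (hkr : kr ∈ pvPairs)
    (hkr' : kr' ∈ pvPairs) (hne : kr'.1 ≠ kr.1) : pvNoHit kr'.1 kr.1 := by
  intro p hp v hpre
  rcases List.prefix_or_prefix_of_prefix hpre (List.prefix_append (kr.1.drop p) v) with h1 | h1
  · have hinf : kr'.1 <:+: kr.1 := h1.isInfix.trans (List.drop_suffix p kr.1).isInfix
    rcases pvF4 kr' hkr' kr hkr with he | hni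
    · exact hne he
    · exact hni hinf
  · rcases Nat.eq_zero_or_pos p with hp0 | hp1
    · subst hp0
      rw [List.drop_zero] at h1
      rcases pvF4 kr hkr kr' hkr' with he | hni
      · exact hne he.symm
      · exact hni h1.isInfix
    · exact pvF5 kr hkr p hp1 hp kr' hkr' h1

theorem pvPost_noHit (kr kr' : List Char × List Char) (hkr : kr ∈ pvPairs)
    (hkr' : kr' ∈ pvPairs) : pvNoHit kr'.1 kr.2 := by
  intro p hp v hpre
  rcases List.prefix_or_prefix_of_prefix hpre (List.prefix_append (kr.2.drop p) v) with h1 | h1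
  · exact pvF6 kr' hkr' kr hkr (h1.isInfix.trans (List.drop_suffix p kr.2).isInfix)
  · rcases Nat.eq_zero_or_pos p with hp0 | hp1
    · subst hp0
      rw [List.drop_zero] at h1
      exact pvF2 kr hkr kr' hkr' h1.isInfix
    · exact pvF9 kr hkr p hp1 hp kr' hkr' h1

-- ---- the matched-key step ----

theorem pvRep_append_match (k r u : List Char) (_hk : k ≠ []) :
    pvRep k r (k ++ u) = r ++ pvRep k r (List.drop (k.length - 1) (k.tail ++ u)) := by
  rcases k with _ | ⟨k0, k1⟩
  · exact absurd rfl _hk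
  · rw [List.cons_append, pvRep_cons,
        if_pos (List.isPrefixOf_iff_prefix.mpr
          (by rw [← List.cons_append]; exact List.prefix_append _ _))]
    rfl

theorem pvRep_id (k r u : List Char) (_hk : k ≠ []) (h : ¬ k <:+: u) : pvRep k r u = u := by
  induction u with
  | nil => exact pvRep_nil k r
  | cons c t ih =>
    rw [pvRep_cons, if_neg (by
      rw [List.isPrefixOf_iff_prefix]
      intro hpre
      exact h hpre.isInfix)]
    rw [ih (fun hinf => h (List.infix_cons_iff.mpr (Or.inr hinf)))]

theorem pvRep_eq_step (kr : List Char × List Char) (u : List Char) (hkr : kr ∈ pvPairs) :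
    pvRep kr.1 kr.2 u = pvStep u kr := by
  unfold pvStep
  by_cases hin : PySem.Chars.isIn kr.1 u
  · rw [if_pos hin, pvReplace_eq_rep _ _ _ (pvF_ne kr hkr)]
  · rw [if_neg hin]
    exact pvRep_id kr.1 kr.2 u (pvF_ne kr hkr)
      ((PySem.Chars.isIn_eq_false_iff _ _).mp (by cases h : PySem.Chars.isIn kr.1 u <;> simp_all))

theorem pvStep_match (kr : List Char × List Char) (w : List Char) (hkr : kr ∈ pvPairs)
    (u : List Char) (hu : kr.1 ++ u = w)  :
    pvStep w kr = kr.2 ++ pvStep (List.drop (kr.1.length - 1) (kr.1.tail ++ u)) kr := by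
  subst hu
  have hin : PySem.Chars.isIn kr.1 (kr.1 ++ u) = true := by
    rw [PySem.Chars.isIn_iff_infix]
    exact (List.prefix_append kr.1 u).isInfix
  rw [show pvStep (kr.1 ++ u) kr = PySem.Chars.replace (kr.1 ++ u) kr.1 kr.2 from by
        unfold pvStep; rw [if_pos hin],
      pvReplace_eq_rep _ _ _ (pvF_ne kr hkr), pvRep_append_match _ _ _ (pvF_ne kr hkr),
      pvRep_eq_step kr _ hkr]

-- ---- stage 1: pvFold pvPairs = pvScanS ----

theorem pvScanS_nil : pvScanS [] = [] := by rw [pvScanS]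

theorem pvScanS_cons (c : Char) (t : List Char) :
    pvScanS (c :: t) =
      match List.find? (fun kr => kr.1.isPrefixOf (c :: t)) pvPairs with
      | some kr => kr.2 ++ pvScanS (List.drop (kr.1.length - 1) t)
      | none => c :: pvScanS t := by
  rw [pvScanS]

theorem pvStep_nil (kr : List Char × List Char) (hkr : kr ∈ pvPairs) : pvStep [] kr = [] := by
  unfold pvStep
  have hin : PySem.Chars.isIn kr.1 [] = false := by
    rw [PySem.Chars.isIn_eq_false_iff]
    intro hinf
    exact pvF_ne kr hkr (List.infix_nil.mp hinf)
  rw [if_neg (by simp [hin])]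

theorem pvFold_nil : pvFold pvPairs [] = [] := by
  have key : ∀ P : List (List Char × List Char), (∀ x ∈ P, x ∈ pvPairs) →
      List.foldl pvStep [] P = [] := by
    intro P
    induction P with
    | nil => intro _; rfl
    | cons kr P' ih =>
      intro hP
      rw [List.foldl_cons, pvStep_nil kr (hP kr List.mem_cons_self)]
      exact ih (fun x hx => hP x (List.mem_cons_of_mem _ hx))
  exact key pvPairs (fun x hx => hx)

theorem pvDropTail (k w : List Char) (hk : k ≠ []) :
    List.drop (k.length - 1) (k.tail ++ w) = w := by
  rcases k with _ | ⟨k0, k1⟩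
  · exact absurd rfl hk
  · simp

theorem pvMainA_aux : ∀ (n : Nat) (l : List Char), l.length ≤ n → pvFold pvPairs l = pvScanS l := by
  intro n
  induction n with
  | zero =>
    intro l h
    have : l = [] := by cases l <;> simp_all
    subst this
    rw [pvScanS_nil, pvFold_nil]
  | succ n ih =>
    intro l h
    cases l with
    | nil => rw [pvScanS_nil, pvFold_nil]
    | cons c t =>
      rw [pvScanS_cons]
      rcases hf : List.find? (fun kr => kr.1.isPrefixOf (c :: t)) pvPairs with _ | kr
      · rw [hf]
        have hng : pvGood c t := by
          intro kr hkr
          have := List.find?_eq_none.mp hf kr hkr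
          simpa [List.isPrefixOf_iff_prefix] using this
        have ht : t.length ≤ n := by simp only [List.length_cons] at h; omega
        unfold pvFold
        rw [pvFold_cons pvPairs (fun x hx => hx) c t hng]
        rw [show List.foldl pvStep t pvPairs = pvFold pvPairs t from rfl, ih t ht]
      · rw [hf]
        show pvFold pvPairs (c :: t) = kr.2 ++ pvScanS (List.drop (kr.1.length - 1) t)
        obtain ⟨hpred, P₁, P₂, hK, hprev⟩ := List.find?_eq_some_iff_append.mp hf
        have hkr : kr ∈ pvPairs := List.mem_of_find?_eq_some hf
        have hkpre : kr.1 <+: (c :: t) := List.isPrefixOf_iff_prefix.mp hpred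
        obtain ⟨u, hu⟩ := hkpre
        have hkne : kr.1 ≠ [] := pvF_ne kr hkr
        have hne1 : ∀ x ∈ P₁, x.1 ≠ kr.1 := by
          intro x hx he
          have hnd := pvF_nodup
          rw [hK, List.map_append, List.map_cons] at hnd
          have hdisj := (List.nodup_append.mp hnd).2.2
          have h1 : x.1 ∈ List.map Prod.fst P₁ := List.mem_map_of_mem hx
          rw [he] at h1
          exact hdisj _ h1 _ List.mem_cons_self rfl
        have hmem1 : ∀ x ∈ P₁, x ∈ pvPairs := by
          intro x hx; rw [hK]; exact List.mem_append_left _ hx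
        have hmem2 : ∀ x ∈ P₂, x ∈ pvPairs := by
          intro x hx; rw [hK]; exact List.mem_append_right _ (List.mem_cons_of_mem _ hx)
        have htail : t = kr.1.tail ++ u := by
          rcases hk : kr.1 with _ | ⟨k0, k1⟩
          · exact absurd hk hkne
          · rw [hk] at hu
            simp only [List.cons_append, List.cons.injEq] at hu
            rw [List.tail_cons]
            exact hu.2.symm
        have hu2 : List.drop (kr.1.length - 1) t = u := by
          rw [htail]; exact pvDropTail kr.1 u hkne
        have hA : pvFold pvPairs (c :: t) = kr.2 ++ pvFold pvPairs u := by
          unfold pvFold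
          rw [← hu, hK, List.foldl_append, List.foldl_cons]
          rw [pvFold_shift P₁ hmem1 kr.1
                (fun x hx => pvPre_noHit kr x hkr (hmem1 x hx) (hne1 x hx)) u]
          rw [pvStep_match kr _ hkr (List.foldl pvStep u P₁) rfl]
          rw [pvDropTail kr.1 _ hkne]
          rw [pvFold_shift P₂ hmem2 kr.2
                (fun x hx => pvPost_noHit kr x hkr (hmem2 x hx)) _]
          rw [List.foldl_append, List.foldl_cons]
        have hlu : u.length ≤ n := by
          have := congrArg List.length hu
          simp only [List.length_append, List.length_cons] at this
          have hk1 : 1 ≤ kr.1.length := List.length_pos_iff.mpr hkne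
          simp only [List.length_cons] at h
          omega
        rw [hA, hu2, ih u hlu]

theorem pvMainA (l : List Char) : pvFold pvPairs l = pvScanS l :=
  pvMainA_aux l.length l le_rfl

-- ---- stage 2: pvScanB = pvScanS ----

theorem pvScanB_nil : pvScanB [] = [] := by rw [pvScanB]

theorem pvScanB_cons (c : Char) (t : List Char) :
    pvScanB (c :: t) =
      if PySem.Chars.find (c :: t) pvStdB = -1 then c :: t
      else
        match List.find?
            (fun kr => kr.1.toList.isPrefixOf
              ((c :: t).drop ((PySem.Chars.find (c :: t) pvStdB).toNat + 5))) pvSuffixes with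
        | some kr =>
          (c :: t).take (PySem.Chars.find (c :: t) pvStdB).toNat ++ kr.2.toList ++
            pvScanB ((c :: t).drop ((PySem.Chars.find (c :: t) pvStdB).toNat + 5 + kr.1.toList.length))
        | none =>
          (c :: t).take ((PySem.Chars.find (c :: t) pvStdB).toNat + 1) ++
            pvScanB ((c :: t).drop ((PySem.Chars.find (c :: t) pvStdB).toNat + 1)) := by
  rw [pvScanB]

-- splitting a prefix test against an appended pattern
theorem pv_append_prefix (a b l : List Char) :
    a ++ b <+: l ↔ a <+: l ∧ b <+: l.drop a.length := by
  constructor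
  · rintro ⟨v, hv⟩
    subst hv
    refine ⟨⟨b ++ v, by simp⟩, ?_⟩
    rw [List.append_assoc, List.drop_left]
    exact List.prefix_append b v
  · rintro ⟨⟨v, hv⟩, hb⟩
    subst hv
    rw [List.drop_left] at hb
    obtain ⟨w, hw⟩ := hb
    exact ⟨w, by rw [List.append_assoc, hw]⟩

-- on a string starting with "std::", the first full-key match of A's table is exactly
-- the first suffix match of B's table, shifted by the common prefix
theorem pvFindPairs (m : List Char) (hstd : pvStdB <+: m) :
    List.find? (fun kr => kr.1.isPrefixOf m) pvPairs =
      (List.find? (fun kr => kr.1.toList.isPrefixOf (m.drop 5)) pvSuffixes).map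
        (fun p => (pvStdB ++ p.1.toList, p.2.toList)) := by
  rw [pvTableEq, List.find?_map]
  have hp : ((fun kr : List Char × List Char => kr.1.isPrefixOf m) ∘
        fun p : String × String => (pvStdB ++ p.1.toList, p.2.toList)) =
      (fun kr : String × String => kr.1.toList.isPrefixOf (m.drop 5)) := by
    funext kr
    show (pvStdB ++ kr.1.toList).isPrefixOf m = kr.1.toList.isPrefixOf (m.drop 5)
    rw [Bool.eq_iff_iff, List.isPrefixOf_iff_prefix, List.isPrefixOf_iff_prefix,
        pv_append_prefix, show pvStdB.length = 5 by decide]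
    exact ⟨fun h => h.2, fun h => ⟨hstd, h⟩⟩
  rw [hp]

theorem pvScanS_id : ∀ l : List Char, (∀ p : Nat, ∀ kr ∈ pvPairs, ¬ kr.1 <+: l.drop p) →
    pvScanS l = l := by
  intro l
  induction l with
  | nil => intro _; exact pvScanS_nil
  | cons c t ih =>
    intro h
    have hf : List.find? (fun kr => kr.1.isPrefixOf (c :: t)) pvPairs = none := by
      rw [List.find?_eq_none]
      intro kr hkr
      simp only [List.isPrefixOf_iff_prefix]
      have := h 0 kr hkr
      simpa using this
    rw [pvScanS_cons, hf, ih (fun p kr hkr => by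
      have := h (p + 1) kr hkr
      simpa using this)]

theorem pvScanS_shift : ∀ (a v : List Char),
    (∀ p : Nat, p < a.length → ∀ kr ∈ pvPairs, ¬ kr.1 <+: List.drop p (a ++ v)) →
    pvScanS (a ++ v) = a ++ pvScanS v := by
  intro a
  induction a with
  | nil => intro v _; simp
  | cons c a' ih =>
    intro v h
    rw [List.cons_append]
    have hf : List.find? (fun kr => kr.1.isPrefixOf (c :: (a' ++ v))) pvPairs = none := by
      rw [List.find?_eq_none]
      intro kr hkr
      have := h 0 (by simp) kr hkr
      simp only [List.drop_zero, List.cons_append] at this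
      simpa [List.isPrefixOf_iff_prefix]
    rw [pvScanS_cons, hf, ih v (fun p hp kr hkr => by
      have := h (p + 1) (by simp only [List.length_cons]; omega) kr hkr
      simpa using this)]
    rfl

theorem pvMainB_aux : ∀ (n : Nat) (l : List Char), l.length ≤ n → pvScanB l = pvScanS l := by
  intro n
  induction n with
  | zero =>
    intro l h
    have : l = [] := by cases l <;> simp_all
    subst this
    rw [pvScanB_nil, pvScanS_nil]
  | succ n ih =>
    intro l hlen
    cases l with
    | nil => rw [pvScanB_nil, pvScanS_nil]
    | cons c t =>
      rw [pvScanB_cons]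
      by_cases hj : PySem.Chars.find (c :: t) pvStdB = -1
      · rw [if_pos hj]
        refine (pvScanS_id (c :: t) ?_).symm
        intro p kr hkr hpre
        have hstd : pvStdB <+: List.drop p (c :: t) := (pvF_std kr hkr).trans hpre
        have : pvStdB <:+: (c :: t) := hstd.isInfix.trans (List.drop_suffix p (c :: t)).isInfix
        exact (PySem.Chars.find_eq_neg_one_iff (c :: t) pvStdB).mp hj this
      · rw [if_neg hj]
        set l := c :: t with hl
        set j := PySem.Chars.find l pvStdB with hjdef
        have hspec := PySem.Chars.findFrom_natCast_spec l pvStdB 0 (Nat.zero_le _)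
          (by rw [Nat.cast_zero, PySem.Chars.findFrom_zero]; exact_mod_cast hj)
        rw [Nat.cast_zero, PySem.Chars.findFrom_zero] at hspec
        obtain ⟨hj0, hjpre, hjmin⟩ := hspec
        have hjlen : j.toNat ≤ l.length := by
          have := PySem.Chars.find_le_length l pvStdB
          omega
        -- the full-key search of the spec, rephrased as B's suffix search
        have hdrop5 : (List.drop j.toNat l).drop 5 = List.drop (j.toNat + 5) l := by
          rw [List.drop_drop, Nat.add_comm]
        have hfull := pvFindPairs (List.drop j.toNat l) hjpre
        rw [hdrop5] at hfull
        -- no key can match strictly before j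
        have hnokey : ∀ p : Nat, p < j.toNat → ∀ kr ∈ pvPairs, ¬ kr.1 <+: List.drop p l := by
          intro p hp kr hkr hpre
          exact hjmin p (Nat.zero_le _) hp ((pvF_std kr hkr).trans hpre)
        have hsplit : List.take j.toNat l ++ List.drop j.toNat l = l := List.take_append_drop _ _
        have hscanS : pvScanS l = List.take j.toNat l ++ pvScanS (List.drop j.toNat l) := by
          conv_lhs => rw [← hsplit]
          refine pvScanS_shift _ _ ?_
          intro p hp kr hkr
          rw [hsplit]
          have hp' : p < j.toNat := by
            simp only [List.length_take] at hp
            omega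
          exact hnokey p hp' kr hkr
        -- the remainder starts with "std::", in particular is nonempty
        obtain ⟨d, t'', hd⟩ : ∃ d t'', List.drop j.toNat l = d :: t'' := by
          rcases hx : List.drop j.toNat l with _ | ⟨d, t''⟩
          · rw [hx] at hjpre
            have : pvStdB = [] := List.prefix_nil.mp hjpre
            simp [pvStdB] at this
          · exact ⟨d, t'', rfl⟩
        rcases hfind : List.find?
            (fun kr => kr.1.toList.isPrefixOf (List.drop (j.toNat + 5) l)) pvSuffixes
          with _ | kr
        · -- no table entry matches at j: copy one char
          rw [hfind, Option.map_none] at hfull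
          have ht'' : t'' = List.drop (j.toNat + 1) l := by
            have : List.drop 1 (List.drop j.toNat l) = List.drop (j.toNat + 1) l := by
              rw [List.drop_drop, Nat.add_comm]
            rw [hd] at this
            simpa using this
          have htake : List.take (j.toNat + 1) l = List.take j.toNat l ++ [d] := by
            conv_lhs => rw [← hsplit, hd]
            rw [show j.toNat + 1 = (List.take j.toNat l).length + 1 by
                  simp [List.length_take]; omega]
            simp [List.take_append]
          have hlen'' : (List.drop (j.toNat + 1) l).length ≤ n := by
            simp only [List.length_drop, hl, List.length_cons]
            simp only [hl, List.length_cons] at hlen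
            omega
          rw [hscanS, hd, pvScanS_cons]
          have hfind' : List.find? (fun kr => kr.1.isPrefixOf (d :: t'')) pvPairs = none := by
            rw [← hd]; exact hfull
          rw [hfind', hfind]
          show List.take (j.toNat + 1) l ++ pvScanB (List.drop (j.toNat + 1) l) =
            List.take j.toNat l ++ (d :: pvScanS t'')
          rw [htake, ih _ hlen'', ← ht'']
          simp
        · -- table entry kr matches at j
          rw [hfind, Option.map_some] at hfull
          set krP : List Char × List Char := (pvStdB ++ kr.1.toList, kr.2.toList) with hkrP
          have hkr : krP ∈ pvPairs := List.mem_of_find?_eq_some hfull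
          have hkne : krP.1 ≠ [] := pvF_ne krP hkr
          have hKlen : krP.1.length = 5 + kr.1.toList.length := by
            show (pvStdB ++ kr.1.toList).length = 5 + kr.1.toList.length
            rw [List.length_append, show pvStdB.length = 5 by decide]
          have hdroparg : List.drop (j.toNat + 5 + kr.1.toList.length) l =
              List.drop (krP.1.length - 1) t'' := by
            have h1 : List.drop (krP.1.length - 1 + 1) (List.drop j.toNat l) =
                List.drop (j.toNat + (krP.1.length - 1 + 1)) l := by
              rw [List.drop_drop, Nat.add_comm]
            rw [hd] at h1
            rw [show j.toNat + 5 + kr.1.toList.length = j.toNat + (krP.1.length - 1 + 1) by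
                  rw [hKlen]; omega,
                ← h1, List.drop_succ_cons]
          have h1 : t''.length < l.length := by
            have := congrArg List.length hd
            simp only [List.length_drop, List.length_cons] at this
            omega
          have hlen'' : (List.drop (krP.1.length - 1) t'').length ≤ n := by
            simp only [List.length_drop]
            have : l.length ≤ n + 1 := hlen
            omega
          rw [hscanS, hd, pvScanS_cons]
          have hfind' : List.find? (fun kr => kr.1.isPrefixOf (d :: t'')) pvPairs = some krP := by
            rw [← hd]; exact hfull
          rw [hfind', hfind]
          show List.take j.toNat l ++ kr.2.toList ++
              pvScanB (List.drop (j.toNat + 5 + kr.1.toList.length) l) =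
            List.take j.toNat l ++ (krP.2 ++ pvScanS (List.drop (krP.1.length - 1) t''))
          rw [hdroparg, ih _ hlen'', List.append_assoc]

theorem pvMainB (l : List Char) : pvScanB l = pvScanS l :=
  pvMainB_aux l.length l le_rfl

-- ---- assembling the String-level claim ----

theorem pvPortA_toList (s : String) :
    (apply_common_simplifications_py s).toList = pvFold pvPairs s.toList := by
  have key : ∀ (ps : List (String × String)) (x : String),
      (ps.foldl (fun s kv => if PySem.Str.isIn kv.1 s then PySem.Str.replace s kv.1 kv.2 else s)
        x).toList =
      List.foldl pvStep x.toList (ps.map (fun p => (p.1.toList, p.2.toList))) := by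
    intro ps
    induction ps with
    | nil => intro x; rfl
    | cons kv ps' ih =>
      intro x
      rw [List.foldl_cons, List.map_cons, List.foldl_cons]
      have hstep :
          (if PySem.Str.isIn kv.1 x then PySem.Str.replace x kv.1 kv.2 else x).toList =
            pvStep x.toList (kv.1.toList, kv.2.toList) := by
        unfold pvStep
        rw [PySem.Str.isIn_eq]
        split_ifs with h
        · exact PySem.Str.toList_replace x kv.1 kv.2
        · rfl
      rw [ih, hstep]
  exact key pvTypedefs s

-- ===== VERDICT (by name: the statement is the Claim_ definition above) =====
theorem apply_common_simplifications_py_spec : Claim_equal_apply_common_simplifications_py := by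
  intro s _
  unfold Spec_apply_common_simplifications_py apply_common_simplifications_py_alt
  rw [pvMainB, ← pvMainA, ← pvPortA_toList, String.ofList_toList]
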